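-- pv_equiv track=rewrite | github.com/ktawiah/CodePath-DSA | Unit-2/Session-2/Standard_V1/prioritize_observations.py | prioritize_observations
-- ===== SOURCE A (Python) =====
-- def prioritize_observations(observed_species, priority_species):
--     """
--     P: Sort elements in observed species in the order of priority species
--     """
--     # Create a new list for sorted species
--     sorted_species = []
--
--     # Iterate through priority species
--     for specie in priority_species:
--
--         # Iterate through observed species
--         index = 0
--         while index < len(observed_species):
--             # Update sorted list
--             if specie == observed_species[index]:
--                 sorted_species.append(observed_species.pop(index))
--                 index -= 1
--             index += 1
--
--     # Return sorted list
--     return sorted_species + observed_species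
-- ===== SOURCE B (Python) =====
-- def prioritize_observations(observed_species, priority_species):
--     """
--     Count observed species once, emit each priority species count times,
--     then append the non-priority observations in their original order.
--     (Returns the same list as the original; does not mutate observed_species.)
--     """
--     counts = {}
--     for s in observed_species:
--         counts[s] = counts.get(s, 0) + 1
--     result = []
--     for p in priority_species:
--         result += [p] * counts.pop(p, 0)
--     return result + [s for s in observed_species if s in counts]
-- ===== Notes on version B (the rewrite author's own statement) =====
-- stated objective: faster
-- what changed: Replaces the nested scan-and-pop over observed_species per priority species by a single counting pass into a dict, emitting each priority species count times and filtering the leftovers once; B also does not mutate observed_species (equivalence is about the return value).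
import Mathlib
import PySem

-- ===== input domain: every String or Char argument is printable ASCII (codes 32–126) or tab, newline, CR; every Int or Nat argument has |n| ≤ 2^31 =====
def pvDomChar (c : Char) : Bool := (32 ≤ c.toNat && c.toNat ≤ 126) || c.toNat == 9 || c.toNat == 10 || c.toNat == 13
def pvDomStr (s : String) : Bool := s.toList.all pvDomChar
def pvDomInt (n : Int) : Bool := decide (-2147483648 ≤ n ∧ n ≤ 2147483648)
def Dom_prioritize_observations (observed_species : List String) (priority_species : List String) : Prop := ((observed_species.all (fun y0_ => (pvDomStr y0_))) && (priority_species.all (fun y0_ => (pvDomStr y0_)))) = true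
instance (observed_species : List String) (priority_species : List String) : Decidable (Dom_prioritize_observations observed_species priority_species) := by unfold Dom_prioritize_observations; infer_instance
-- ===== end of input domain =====

-- B replaces A's nested scan-and-pop (O(P*O)) by one counting pass plus one filtering pass (O(P+O));
-- A mutates observed_species in place, B does not — the equivalence proved here is about the RETURN value only.

-- ===== PORT A =====
-- A's inner while loop. index starts at 0 and after a pop Python does 'index -= 1; index += 1',
-- a net no-op, so index never goes negative and is a Nat here; observed_species.pop(index) for an
-- in-range index returns observed[index] and leaves observed.eraseIdx index.
def pvWhileA (specie : String) (index : Nat) (observed : List String) (sorted : List String) :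
    List String × List String :=
  if h : index < observed.length then
    if specie == observed[index] then
      pvWhileA specie index (observed.eraseIdx index) (sorted ++ [observed[index]])
    else
      pvWhileA specie (index + 1) observed sorted
  else (observed, sorted)
termination_by observed.length - index
decreasing_by
  · have := List.length_eraseIdx_of_lt h; omega
  · omega

def prioritize_observations (observed_species : List String) (priority_species : List String) : List String :=
  let st := priority_species.foldl (fun st specie => pvWhileA specie 0 st.1 st.2)
      (observed_species, ([] : List String))
  st.2 ++ st.1

-- ===== PORT B =====
def prioritize_observations_alt (observed_species : List String) (priority_species : List String) : List String :=
  -- counts[s] = counts.get(s, 0) + 1 over observed_species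
  let counts : PySem.Dict String Int :=
    observed_species.foldl (fun d s => d.insert s (d.getD s 0 + 1)) PySem.Dict.empty
  -- result += [p] * counts.pop(p, 0)
  let st := priority_species.foldl
      (fun (st : List String × PySem.Dict String Int) p =>
        (st.1 ++ List.replicate (st.2.getD p 0).toNat p, st.2.erase p))
      (([] : List String), counts)
  st.1 ++ observed_species.filter (fun s => st.2.contains s)

-- ===== PRECONDITION & SPEC =====
def Spec_prioritize_observations (observed_species : List String) (priority_species : List String) (out : List String) : Prop := out = prioritize_observations_alt observed_species priority_species
instance (observed_species : List String) (priority_species : List String) (out : List String) : Decidable (Spec_prioritize_observations observed_species priority_species out) := by unfold Spec_prioritize_observations; infer_instance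

-- ===== CLAIM (what is proved, stated in full; the proofs are below) =====
def Claim_equal_prioritize_observations : Prop := ∀ (observed_species : List String) (priority_species : List String), Dom_prioritize_observations observed_species priority_species → Spec_prioritize_observations observed_species priority_species (prioritize_observations observed_species priority_species)

-- ===== LEMMAS AND PROOFS =====

-- A's while loop scans observed from position index, moving every element equal to specie
-- (in order) to the end of sorted and keeping the rest.
theorem pvWhileA_spec (specie : String) (index : Nat) (observed sorted : List String) :
    pvWhileA specie index observed sorted =
      (observed.take index ++ (observed.drop index).filter (fun s => !(s == specie)),
       sorted ++ (observed.drop index).filter (fun s => s == specie)) := by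
  fun_induction pvWhileA specie index observed sorted with
  | case1 index observed sorted h heq ih =>
      have hdrop : observed.drop index = observed[index] :: observed.drop (index+1) :=
        List.drop_eq_getElem_cons h
      have herase : observed.eraseIdx index = observed.take index ++ observed.drop (index+1) :=
        List.eraseIdx_eq_take_drop_succ ..
      have hlen : (observed.take index).length = index := by
        simp [List.length_take]; omega
      have hbeq : (observed[index] == specie) = true := by
        have := eq_of_beq heq; simp [this]
      rw [ih, Prod.mk.injEq]
      have htake : (observed.eraseIdx index).take index = observed.take index := by
        rw [herase, List.take_append_of_le_length (by omega), List.take_take]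
        simp
      have hdrop2 : (observed.eraseIdx index).drop index = observed.drop (index+1) := by
        rw [herase, List.drop_left' hlen]
      rw [htake, hdrop2, hdrop, List.filter_cons_of_neg (by simp [hbeq]),
        List.filter_cons_of_pos (by simp [hbeq])]
      exact ⟨rfl, by simp⟩
  | case2 index observed sorted h heq ih =>
      have hdrop : observed.drop index = observed[index] :: observed.drop (index+1) :=
        List.drop_eq_getElem_cons h
      have hbeq : (observed[index] == specie) = false := by
        rw [beq_eq_false_iff_ne]; intro hc
        exact absurd (by simp [hc] : (specie == observed[index]) = true) (by simpa using heq)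
      rw [ih, Prod.mk.injEq, hdrop,
        List.filter_cons_of_pos (by simp [hbeq]), List.filter_cons_of_neg (by simp [hbeq])]
      exact ⟨by rw [List.take_succ_eq_append_getElem h, List.append_assoc]; rfl, rfl⟩
  | case3 index observed sorted h =>
      have hd : observed.drop index = [] := List.drop_eq_nil_of_le (by omega)
      simp [hd, List.take_of_length_le (by omega : observed.length ≤ index)]

theorem pv_find?_filter_ne (items : List (String × Int)) (k q : String) :
    (items.filter (fun p => !(p.1 == k))).find? (fun p => p.1 == q)
      = if q = k then none else items.find? (fun p => p.1 == q) := by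
  induction items with
  | nil => simp
  | cons hd tl ih =>
      rw [List.filter_cons]
      cases hk : (hd.1 == k) with
      | true =>
          have hk' : hd.1 = k := eq_of_beq hk
          simp only [Bool.not_true, if_neg (by simp : ¬ (false = true))]
          rw [ih]
          by_cases hq : q = k
          · simp [hq]
          · rw [if_neg hq, if_neg hq, List.find?_cons_of_neg (by simp [hk']; exact fun hc => hq (hc ▸ hk' ▸ rfl))]
      | false =>
          have hk' : hd.1 ≠ k := by simpa using hk
          simp only [Bool.not_false]
          rw [if_pos (by trivial)]
          cases hq : (hd.1 == q) with
          | true =>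
              have hq' : hd.1 = q := eq_of_beq hq
              rw [List.find?_cons_of_pos (by simp [hq]), List.find?_cons_of_pos (by simp [hq]),
                if_neg (fun hc => hk' (hq' ▸ hc))]
          | false =>
              rw [List.find?_cons_of_neg (by simp [hq]), List.find?_cons_of_neg (by simp [hq])] at *
              exact ih

theorem pv_get?_erase (d : PySem.Dict String Int) (k q : String) :
    (d.erase k).get? q = if q = k then none else d.get? q := by
  show Option.map _ (List.find? _ (List.filter _ d.items)) = _
  rw [pv_find?_filter_ne]
  by_cases hq : q = k <;> simp [hq] <;> rfl

theorem pv_contains_erase (d : PySem.Dict String Int) (k s : String) :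
    (d.erase k).contains s = (!(s == k) && d.contains s) := by
  rw [PySem.Dict.contains_eq_isSome_get?, pv_get?_erase, PySem.Dict.contains_eq_isSome_get?]
  by_cases hk : s = k <;> simp [hk]

theorem pv_contains_foldl_erase (ps : List String) (acc : List String)
    (d : PySem.Dict String Int) (s : String)
    (h : ((ps.foldl (fun (st : List String × PySem.Dict String Int) p =>
        (st.1 ++ List.replicate (st.2.getD p 0).toNat p, st.2.erase p)) (acc, d)).2.contains s) = true) :
    d.contains s = true := by
  induction ps generalizing acc d with
  | nil => exact h
  | cons p ps ih =>
      have := ih _ _ h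
      rw [pv_contains_erase] at this
      exact (Bool.and_eq_true_iff.mp this).2

theorem pv_count_filter_ne (l : List String) (a q : String) :
    (l.filter (fun s => !(s == a))).count q = if q = a then 0 else l.count q := by
  by_cases hq : q = a
  · simp [hq, List.count_eq_zero]
  · rw [if_neg hq, List.count_filter (by simp; exact fun hc => hq (hc ▸ rfl))]

theorem pv_main (ps : List String) (obs acc : List String) (d : PySem.Dict String Int)
    (h1 : ∀ p, d.getD p 0 = (obs.count p : Int))
    (h2 : ∀ s, d.contains s = obs.contains s) :
    (ps.foldl (fun st specie => pvWhileA specie 0 st.1 st.2) (obs, acc)).2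
      = (ps.foldl (fun (st : List String × PySem.Dict String Int) p =>
          (st.1 ++ List.replicate (st.2.getD p 0).toNat p, st.2.erase p)) (acc, d)).1
    ∧ (ps.foldl (fun st specie => pvWhileA specie 0 st.1 st.2) (obs, acc)).1
      = obs.filter (fun s => (ps.foldl (fun (st : List String × PySem.Dict String Int) p =>
          (st.1 ++ List.replicate (st.2.getD p 0).toNat p, st.2.erase p)) (acc, d)).2.contains s) := by
  induction ps generalizing obs acc d with
  | nil =>
      refine ⟨rfl, ?_⟩
      have he : (fun s => d.contains s) = (fun s => obs.contains s) := funext h2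
      simp only [List.foldl_nil, he]
      exact (List.filter_eq_self.mpr (fun a ha => by simpa [List.contains_eq_mem] using ha)).symm
  | cons p ps ih =>
      rw [List.foldl_cons, List.foldl_cons, pvWhileA_spec]
      simp only [List.take_zero, List.drop_zero, List.nil_append]
      have hrep : List.replicate (d.getD p 0).toNat p = obs.filter (fun s => s == p) := by
        rw [h1 p, Int.toNat_natCast, List.filter_beq]
      rw [hrep]
      have h1' : ∀ q, (d.erase p).getD q 0 = ((obs.filter (fun s => !(s == p))).count q : Int) := by
        intro q
        show ((d.erase p).get? q).getD 0 = _
        rw [pv_get?_erase, pv_count_filter_ne]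
        by_cases hq : q = p
        · simp [hq]
        · rw [if_neg hq, if_neg hq]; exact h1 q
      have h2' : ∀ s, (d.erase p).contains s = (obs.filter (fun s => !(s == p))).contains s := by
        intro s
        rw [pv_contains_erase, h2]
        by_cases hs : s = p
        · simp [hs, List.contains_eq_mem]
        · simp [List.contains_eq_mem, show (s == p) = false by simpa using hs]
      obtain ⟨ihs, iho⟩ := ih (obs.filter (fun s => !(s == p))) (acc ++ obs.filter (fun s => s == p)) (d.erase p) h1' h2'
      refine ⟨ihs, ?_⟩
      rw [iho, List.filter_filter]
      apply List.filter_congr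
      intro x hx
      cases hxp : (x == p) with
      | true =>
          have hxp' : x = p := eq_of_beq hxp
          have hnc : ((ps.foldl (fun (st : List String × PySem.Dict String Int) p =>
              (st.1 ++ List.replicate (st.2.getD p 0).toNat p, st.2.erase p))
              (acc ++ obs.filter (fun s => s == p), d.erase p)).2.contains x) = false := by
            cases hc : ((ps.foldl (fun (st : List String × PySem.Dict String Int) p =>
                (st.1 ++ List.replicate (st.2.getD p 0).toNat p, st.2.erase p))
                (acc ++ obs.filter (fun s => s == p), d.erase p)).2.contains x) with
            | false => rfl
            | true =>
                have := pv_contains_foldl_erase _ _ _ _ hc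
                rw [pv_contains_erase] at this
                simp [hxp] at this
          simp [hnc]
      | false => simp

-- ===== VERDICT (by name: the statement is the Claim_ definition above) =====
theorem prioritize_observations_spec : Claim_equal_prioritize_observations := by
  intro observed priority _
  unfold Spec_prioritize_observations prioritize_observations prioritize_observations_alt
  rw [PySem.Dict.foldl_insert_getD_add_one_eq_counter]
  have h1 : ∀ p, (PySem.Dict.counter observed).getD p 0 = (observed.count p : Int) := fun p =>
    PySem.Dict.getD_counter observed p
  have h2 : ∀ s, (PySem.Dict.counter observed).contains s = observed.contains s := fun s =>
    PySem.Dict.contains_counter observed s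
  obtain ⟨hs, ho⟩ := pv_main priority observed [] (PySem.Dict.counter observed) h1 h2
  simp only [hs, ho]
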